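-- pv_equiv track=rewrite | github.com/Dshrewsbury/rag-scratch | rag/processing/chunking/recursive_chunker.py | extract_book_metadata
-- ===== SOURCE A (Python) =====
-- from typing import List, Dict, Any, Tuple
--
-- def extract_book_metadata(md_text: str) -> Dict[str, Any]:
--     """
--     Extract book metadata from markdown text including title, author, series.
--
--     Args:
--         md_text: Markdown text content
--
--     Returns:
--         Dictionary containing extracted metadata
--     """
--     metadata = {
--         "title": None,
--         "author": None,
--         "series": None
--     }
--
--     # Split by page separator
--     pages = md_text.split("-----")
--
--     for page in pages:
--         page_content = page.strip()
--         if not page_content: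
--             continue
--
--         lines = page_content.split("\n")
--         for line in lines:
--             line = line.strip()
--
--             # Extract title (e.g., "# GHOST OF THE SHADOWFORT")
--             if line.startswith("# ") and metadata["title"] is None:
--                 metadata["title"] = line.replace("# ", "").strip()
--
--             # Extract series info (e.g., "### THE BLADEBORN SAGA: BOOK TWO")
--             elif "SAGA" in line and "BOOK" in line and line.startswith("### "):
--                 metadata["series"] = line.replace("### ", "").strip()
--
--             # Extract author (e.g., "## T. C. EDGE")
--             elif line.startswith("## ") and metadata["author"] is None and not line.startswith("## CHAPTER"):
--                 metadata["author"] = line.replace("## ", "").strip()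
--
--     return metadata
-- ===== SOURCE B (Python) =====
-- def extract_book_metadata(md_text: str):
--     # Flatten once: pages split on "-----", stripped, empty pages dropped,
--     # then each page's lines stripped; resolve each field in its own pass.
--     lines = [ln.strip()
--              for page in md_text.split("-----")
--              if page.strip()
--              for ln in page.strip().split("\n")]
--     title = next((l.replace("# ", "").strip()
--                   for l in lines if l.startswith("# ")), None)
--     author = next((l.replace("## ", "").strip()
--                    for l in lines
--                    if l.startswith("## ") and not l.startswith("## CHAPTER")), None)
--     series = next((l.replace("### ", "").strip()
--                    for l in reversed(lines)
--                    if "SAGA" in l and "BOOK" in l and l.startswith("### ")), None)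
--     return {"title": title, "author": author, "series": series}
-- ===== Notes on version B (the rewrite author's own statement) =====
-- stated objective: simpler
-- what changed: Replaces the stateful nested page/line loop with an if/elif chain by a single flattening of all stripped lines followed by three independent per-field passes: first match for title and author via next(), last match for series via a reversed scan.
import Mathlib
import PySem

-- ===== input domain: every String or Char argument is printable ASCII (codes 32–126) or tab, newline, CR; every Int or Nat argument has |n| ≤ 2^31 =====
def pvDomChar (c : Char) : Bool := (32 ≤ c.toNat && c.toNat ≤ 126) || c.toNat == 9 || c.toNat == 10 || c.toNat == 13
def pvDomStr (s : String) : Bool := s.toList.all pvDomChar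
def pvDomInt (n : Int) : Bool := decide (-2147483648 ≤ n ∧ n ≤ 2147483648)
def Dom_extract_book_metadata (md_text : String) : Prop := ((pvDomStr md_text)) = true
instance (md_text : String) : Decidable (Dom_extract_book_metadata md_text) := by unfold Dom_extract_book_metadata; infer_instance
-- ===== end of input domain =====

-- B replaces A's stateful nested page/line loop by one flattened line list and three
-- independent per-field passes (first match for title/author, last match for series); simpler.

-- ===== PORT A =====
-- A's metadata dict has the three fixed string keys "title","author","series" set at the start
-- and only overwritten; it is ported as the triple (title, author, series) and assembled in
-- insertion order at return.
def pvStepA (st : Option String × Option String × Option String) (raw : String) :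
    Option String × Option String × Option String :=
  let line := PySem.Str.strip raw
  if PySem.Str.startswith line "# " && st.1.isNone then
    (some (PySem.Str.strip (PySem.Str.replace line "# " "")), st.2.1, st.2.2)
  else if PySem.Str.isIn "SAGA" line && PySem.Str.isIn "BOOK" line &&
      PySem.Str.startswith line "### " then
    (st.1, st.2.1, some (PySem.Str.strip (PySem.Str.replace line "### " "")))
  else if PySem.Str.startswith line "## " && st.2.1.isNone &&
      !PySem.Str.startswith line "## CHAPTER" then
    (st.1, some (PySem.Str.strip (PySem.Str.replace line "## " "")), st.2.2)
  else st

def extract_book_metadata (md_text : String) : List (String × Option String) :=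
  let metadata : Option String × Option String × Option String := (none, none, none)
  -- the separators "-----" and "\n" are nonempty literals, so split? is `some`; getD [] is exact
  let pages := (PySem.Str.split? md_text "-----").getD []
  let final := pages.foldl
    (fun st page =>
      let page_content := PySem.Str.strip page
      if page_content = "" then st
      else (((PySem.Str.split? page_content "\n").getD []).foldl pvStepA st))
    metadata
  [("title", final.1), ("author", final.2.1), ("series", final.2.2)]

-- ===== PORT B =====
def pvIsTitle (l : String) : Bool := PySem.Str.startswith l "# "

def pvIsAuthor (l : String) : Bool :=
  PySem.Str.startswith l "## " && !PySem.Str.startswith l "## CHAPTER"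

def pvIsSeries (l : String) : Bool :=
  PySem.Str.isIn "SAGA" l && PySem.Str.isIn "BOOK" l && PySem.Str.startswith l "### "

def pvVal (pre l : String) : String := PySem.Str.strip (PySem.Str.replace l pre "")

def pvFlatLines (md_text : String) : List String :=
  (((((PySem.Str.split? md_text "-----").getD []).map PySem.Str.strip).filter
      (fun p => p != "")).flatMap
    (fun p => ((PySem.Str.split? p "\n").getD []).map PySem.Str.strip))

def extract_book_metadata_alt (md_text : String) : List (String × Option String) :=
  let lines := pvFlatLines md_text
  let title := (lines.find? pvIsTitle).map (pvVal "# ")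
  let author := (lines.find? pvIsAuthor).map (pvVal "## ")
  let series := (lines.reverse.find? pvIsSeries).map (pvVal "### ")
  [("title", title), ("author", author), ("series", series)]

-- ===== PRECONDITION & SPEC =====
def Spec_extract_book_metadata (md_text : String) (out : List (String × Option String)) : Prop := out = extract_book_metadata_alt md_text
instance (md_text : String) (out : List (String × Option String)) : Decidable (Spec_extract_book_metadata md_text out) := by unfold Spec_extract_book_metadata; infer_instance

-- ===== CLAIM (what is proved, stated in full; the proofs are below) =====
def Claim_equal_extract_book_metadata : Prop := ∀ (md_text : String), Dom_extract_book_metadata md_text → Spec_extract_book_metadata md_text (extract_book_metadata md_text)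

-- ===== LEMMAS AND PROOFS =====

-- A's inner loop body on an already-stripped line
def pvStep0 (st : Option String × Option String × Option String) (line : String) :
    Option String × Option String × Option String :=
  if PySem.Str.startswith line "# " && st.1.isNone then
    (some (pvVal "# " line), st.2.1, st.2.2)
  else if PySem.Str.isIn "SAGA" line && PySem.Str.isIn "BOOK" line &&
      PySem.Str.startswith line "### " then
    (st.1, st.2.1, some (pvVal "### " line))
  else if PySem.Str.startswith line "## " && st.2.1.isNone &&
      !PySem.Str.startswith line "## CHAPTER" then
    (st.1, some (pvVal "## " line), st.2.2)
  else st

-- mutually exclusive prefixes: no line starts with two of "# ", "## ", "### "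
lemma pv_not_both (cs r p q : List Char) (c : Char) (hc : c ≠ ' ')
    (h1 : PySem.Chars.startswith cs (r ++ ' ' :: p) = true)
    (h2 : PySem.Chars.startswith cs (r ++ c :: q) = true) : False := by
  rw [PySem.Chars.startswith_iff] at h1 h2
  obtain ⟨u, hu⟩ := h1
  obtain ⟨v, hv⟩ := h2
  rw [← hu] at hv
  simp at hv
  exact hc hv.1

-- B's per-field results
def pvTF (ls : List String) : Option String := (ls.find? pvIsTitle).map (pvVal "# ")
def pvAF (ls : List String) : Option String := (ls.find? pvIsAuthor).map (pvVal "## ")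
def pvSF (ls : List String) : Option String := (ls.reverse.find? pvIsSeries).map (pvVal "### ")

lemma pvSF_cons (l : String) (ls : List String) :
    pvSF (l :: ls) = (pvSF ls).or (if pvIsSeries l then some (pvVal "### " l) else none) := by
  simp only [pvSF, List.reverse_cons, List.find?_append]
  cases h : List.find? pvIsSeries ls.reverse <;>
    cases hl : pvIsSeries l <;> simp [List.find?, hl]

-- loop invariant: A's fold over pre-stripped lines decomposes into the three passes
lemma pv_inv (ls : List String) : ∀ t a s : Option String,
    ls.foldl pvStep0 (t, a, s) = (t.or (pvTF ls), a.or (pvAF ls), (pvSF ls).or s) := by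
  induction ls with
  | nil => simp [pvTF, pvAF, pvSF]
  | cons l ls ih =>
    intro t a s
    rw [List.foldl_cons, pvSF_cons]
    by_cases hT : PySem.Chars.startswith l.toList ['#', ' '] = true
    · have h3 : PySem.Chars.startswith l.toList ['#', '#', '#', ' '] = false := by
        rw [Bool.eq_false_iff]; intro h
        exact pv_not_both l.toList ['#'] [] ['#', ' '] '#' (by decide) hT h
      have h2 : PySem.Chars.startswith l.toList ['#', '#', ' '] = false := by
        rw [Bool.eq_false_iff]; intro h
        exact pv_not_both l.toList ['#'] [] [' '] '#' (by decide) hT h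
      cases t <;>
        simp [pvStep0, hT, h2, h3, ih, pvTF, pvAF, pvIsTitle, pvIsAuthor, pvIsSeries,
          List.find?]
    · by_cases hA1 : PySem.Chars.startswith l.toList ['#', '#', ' '] = true
      · have h3 : PySem.Chars.startswith l.toList ['#', '#', '#', ' '] = false := by
          rw [Bool.eq_false_iff]; intro h
          exact pv_not_both l.toList ['#', '#'] [] [' '] '#' (by decide) hA1 h
        by_cases hA2 : PySem.Chars.startswith l.toList
            ['#', '#', ' ', 'C', 'H', 'A', 'P', 'T', 'E', 'R'] = true
        · simp [pvStep0, hT, h3, hA1, hA2, ih, pvTF, pvAF,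
            pvIsTitle, pvIsAuthor, pvIsSeries, List.find?]
        · cases a <;>
            simp [pvStep0, hT, h3, hA1, hA2, ih, pvTF, pvAF,
              pvIsTitle, pvIsAuthor, pvIsSeries, List.find?]
      · by_cases h3 : PySem.Chars.startswith l.toList ['#', '#', '#', ' '] = true
        · by_cases hSaga : PySem.Chars.isIn ['S', 'A', 'G', 'A'] l.toList = true
          · by_cases hBook : PySem.Chars.isIn ['B', 'O', 'O', 'K'] l.toList = true
            · simp [pvStep0, hT, hA1, h3, hSaga, hBook, ih, pvTF, pvAF,
                pvIsTitle, pvIsAuthor, pvIsSeries, List.find?]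
            · simp [pvStep0, hT, hA1, h3, hSaga, hBook, ih, pvTF, pvAF,
                pvIsTitle, pvIsAuthor, pvIsSeries, List.find?]
          · simp [pvStep0, hT, hA1, h3, hSaga, ih, pvTF, pvAF,
              pvIsTitle, pvIsAuthor, pvIsSeries, List.find?]
        · simp [pvStep0, hT, hA1, h3, ih, pvTF, pvAF,
            pvIsTitle, pvIsAuthor, pvIsSeries, List.find?]

-- A's nested page loop = fold of pvStep0 over B's flattened stripped lines
lemma pv_flat (pages : List String) (st : Option String × Option String × Option String) :
    pages.foldl
      (fun st page =>
        let page_content := PySem.Str.strip page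
        if page_content = "" then st
        else (((PySem.Str.split? page_content "\n").getD []).foldl pvStepA st)) st
    = ((((pages.map PySem.Str.strip).filter (fun p => p != "")).flatMap
        (fun p => ((PySem.Str.split? p "\n").getD []).map PySem.Str.strip)).foldl pvStep0 st) := by
  induction pages generalizing st with
  | nil => simp
  | cons p ps ih =>
    simp only [List.map_cons, List.filter_cons, List.foldl_cons]
    by_cases hp : PySem.Str.strip p = ""
    · simp [hp, ih]
    · simp only [bne_iff_ne, ne_eq, hp, not_false_iff, if_pos, if_neg,
        List.flatMap_cons, List.foldl_append, List.foldl_map, ih]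
      have e : pvStepA = fun st raw => pvStep0 st (PySem.Str.strip raw) := rfl
      rw [e]

-- ===== VERDICT (by name: the statement is the Claim_ definition above) =====
theorem extract_book_metadata_spec : Claim_equal_extract_book_metadata := by
  intro md _
  show extract_book_metadata md = extract_book_metadata_alt md
  simp only [extract_book_metadata, extract_book_metadata_alt, pvFlatLines]
  rw [pv_flat, pv_inv]
  simp [pvTF, pvAF, pvSF]
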